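-- pv_equiv track=rewrite | github.com/DorogAD/checkio | ice_base/task05_long_repeat.py | long_repeat
-- ===== SOURCE A (Python) =====
-- def long_repeat(line: str) -> int:
--     """
--         length the longest substring that consists of the same char
--     """
--     if line == '':
--         return 0
--     previous = line[0]
--     count = 1
--     max_count = 1
--     for letter in line[1:]:
--         if letter == previous:
--             count += 1
--             if count > max_count:
--                 max_count = count
--         elif letter != previous:
--             count = 1
--             previous = letter
--     return max_count
-- ===== SOURCE B (Python) =====
-- def long_repeat(line: str) -> int:
--     best = 0
--     i = 0
--     n = len(line)
--     while i < n:
--         j = i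
--         while j < n and line[j] == line[i]:
--             j += 1
--         best = max(best, j - i)
--         i = j
--     return best
-- ===== Notes on version B (the rewrite author's own statement) =====
-- stated objective: alternative
-- what changed: Replaced the previous/count/max_count state machine over single characters by a two-pointer run splitter: an outer loop jumps run by run, an inner scan finds each run's end, and the maximum run length is taken directly.
import Mathlib
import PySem

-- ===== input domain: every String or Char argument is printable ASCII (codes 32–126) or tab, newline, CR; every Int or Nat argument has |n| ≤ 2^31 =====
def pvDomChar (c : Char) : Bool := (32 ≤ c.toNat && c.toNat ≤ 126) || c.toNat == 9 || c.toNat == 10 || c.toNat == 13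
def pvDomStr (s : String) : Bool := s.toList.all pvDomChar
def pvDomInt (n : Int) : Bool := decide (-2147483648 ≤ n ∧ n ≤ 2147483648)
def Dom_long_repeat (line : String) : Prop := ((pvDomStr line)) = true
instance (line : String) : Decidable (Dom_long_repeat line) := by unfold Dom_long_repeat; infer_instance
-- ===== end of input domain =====

-- B replaces A's previous/count/max_count state machine with a two-pointer run splitter (take each maximal run, max its length); same O(n) cost, alternative structure.


-- ===== PORT A =====
-- state-machine loop over the tail characters, literal to A's for-loop
def loopA : List Char → Char → Int → Int → Int
  | [], _, _, maxCount => maxCount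
  | letter :: rest, previous, count, maxCount =>
    if letter == previous then
      let count' := count + 1
      let maxCount' := if count' > maxCount then count' else maxCount
      loopA rest previous count' maxCount'
    else
      loopA rest letter 1 maxCount

def long_repeat (line : String) : Int :=
  match line.toList with
  | [] => 0
  | c :: rest => loopA rest c 1 1

-- ===== PORT B =====
-- two-pointer run splitter: the inner scan is the takeWhile, the jump to the
-- next run is the dropWhile, the running max over runs is the outer recursion
def maxRuns : List Char → Int
  | [] => 0
  | c :: rest =>
    max (1 + ((rest.takeWhile (· == c)).length : Int))
        (maxRuns (rest.dropWhile (· == c)))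
termination_by l => l.length
decreasing_by
  exact Nat.lt_succ_of_le (List.length_dropWhile_le _ _)

def long_repeat_alt (line : String) : Int := maxRuns line.toList

-- ===== PRECONDITION & SPEC =====
def Spec_long_repeat (line : String) (out : Int) : Prop := out = long_repeat_alt line
instance (line : String) (out : Int) : Decidable (Spec_long_repeat line out) := by unfold Spec_long_repeat; infer_instance

-- ===== CLAIM =====
def Claim_equal_long_repeat : Prop := ∀ (line : String), Dom_long_repeat line → Spec_long_repeat line (long_repeat line)

-- ===== LEMMAS AND PROOFS =====
theorem loopA_eq (l : List Char) (prev : Char) (cnt m : Int)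
    (h1 : 1 ≤ cnt) (h2 : cnt ≤ m) :
    loopA l prev cnt m =
      max m (max (cnt + ((l.takeWhile (· == prev)).length : Int))
                 (maxRuns (l.dropWhile (· == prev)))) := by
  induction l generalizing prev cnt m with
  | nil => simp [loopA, maxRuns]; omega
  | cons c rest ih =>
    by_cases hc : c = prev
    · subst hc
      simp only [loopA, beq_self_eq_true, if_true, List.takeWhile_cons,
        List.dropWhile_cons]
      rw [ih c (cnt + 1) (if cnt + 1 > m then cnt + 1 else m) (by omega) (by split <;> omega)]
      simp only [List.length_cons]
      push_cast
      split <;> omega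
    · have hb : (c == prev) = false := by simp [hc]
      simp only [loopA, hb, if_neg, Bool.false_eq_true, not_false_iff,
        List.takeWhile_cons, List.dropWhile_cons]
      rw [ih c 1 m le_rfl (by omega)]
      simp only [List.length_nil]
      rw [show maxRuns (c :: rest) =
        max (1 + ((rest.takeWhile (· == c)).length : Int))
            (maxRuns (rest.dropWhile (· == c))) by rw [maxRuns]]
      omega

-- ===== VERDICT =====
theorem long_repeat_spec : Claim_equal_long_repeat := by
  intro line _
  unfold Spec_long_repeat long_repeat long_repeat_alt
  cases h : line.toList with
  | nil => simp [maxRuns]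
  | cons c rest =>
    show loopA rest c 1 1 = maxRuns (c :: rest)
    rw [loopA_eq rest c 1 1 le_rfl le_rfl,
      show maxRuns (c :: rest) =
        max (1 + ((rest.takeWhile (· == c)).length : Int))
            (maxRuns (rest.dropWhile (· == c))) by rw [maxRuns]]
    omega
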